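-- pv_equiv track=rewrite | github.com/wayne-spec/SentimentAnalysisRAG | app/services/summarize.py | _truncate_comments
-- ===== SOURCE A (Python) =====
-- from typing import List, Dict, Optional
--
-- MAX_CHARS = 3000
--
-- def _truncate_comments(comments: List[str], max_chars: int = MAX_CHARS) -> List[str]:
--     out = []
--     total = 0
--     for c in comments:
--         if total + len(c) > max_chars:
--             break
--         out.append(c)
--         total += len(c)
--     return out
-- ===== SOURCE B (Python) =====
-- MAX_CHARS = 3000
--
-- def _truncate_comments(comments, max_chars=MAX_CHARS):
--     # build prefix sums of lengths, count how many fit, slice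
--     prefix = []
--     t = 0
--     for c in comments:
--         t += len(c)
--         prefix.append(t)
--     cutoff = sum(1 for p in prefix if p <= max_chars)
--     return comments[:cutoff]
-- ===== Notes on version B (the rewrite author's own statement) =====
-- stated objective: alternative
-- what changed: Replaces the early-break accumulation loop with a build-prefix-sums / count-entries-<=max / slice decomposition (correct because prefix sums of nonnegative lengths are monotone).
import Mathlib
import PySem

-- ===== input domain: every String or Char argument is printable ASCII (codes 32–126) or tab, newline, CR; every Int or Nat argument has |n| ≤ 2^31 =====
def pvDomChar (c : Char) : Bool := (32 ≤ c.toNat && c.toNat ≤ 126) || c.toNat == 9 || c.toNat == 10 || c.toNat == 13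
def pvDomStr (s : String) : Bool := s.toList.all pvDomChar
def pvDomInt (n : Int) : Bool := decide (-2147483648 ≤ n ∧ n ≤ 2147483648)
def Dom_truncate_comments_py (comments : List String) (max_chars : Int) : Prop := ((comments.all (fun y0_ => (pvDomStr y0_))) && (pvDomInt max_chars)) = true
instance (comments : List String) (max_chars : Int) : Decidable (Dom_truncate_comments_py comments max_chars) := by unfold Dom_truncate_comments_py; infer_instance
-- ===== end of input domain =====

-- B replaces A's early-break accumulation loop with a prefix-sum table, a count of entries ≤ max_chars, and a slice (alternative decomposition, same cost).


-- ===== PORT A =====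
-- A's loop: accumulate into out, break when total + len(c) > max_chars
def pvA_go (cs : List String) (total : Int) (max_chars : Int) (out : List String) : List String :=
  match cs with
  | [] => out
  | c :: rest =>
    if total + PySem.Str.len c > max_chars then out
    else pvA_go rest (total + PySem.Str.len c) max_chars (out ++ [c])

def truncate_comments_py (comments : List String) (max_chars : Int) : List String :=
  pvA_go comments 0 max_chars []

-- ===== PORT B =====
-- B's first loop: prefix sums of lengths, running total t
def pvB_prefix (cs : List String) (t : Int) : List Int :=
  match cs with
  | [] => []
  | c :: rest => (t + PySem.Str.len c) :: pvB_prefix rest (t + PySem.Str.len c)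

def truncate_comments_py_alt (comments : List String) (max_chars : Int) : List String :=
  let pref := pvB_prefix comments 0
  let cutoff := pref.countP (fun p => p ≤ max_chars)
  comments.take cutoff

-- ===== PRECONDITION & SPEC =====
def Spec_truncate_comments_py (comments : List String) (max_chars : Int) (out : List String) : Prop := out = truncate_comments_py_alt comments max_chars
instance (comments : List String) (max_chars : Int) (out : List String) : Decidable (Spec_truncate_comments_py comments max_chars out) := by unfold Spec_truncate_comments_py; infer_instance

-- ===== CLAIM (what is proved, stated in full; the proofs are below) =====
def Claim_equal_truncate_comments_py : Prop := ∀ (comments : List String) (max_chars : Int), Dom_truncate_comments_py comments max_chars → Spec_truncate_comments_py comments max_chars (truncate_comments_py comments max_chars)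

-- ===== LEMMAS AND PROOFS =====

-- every prefix sum starting from t is ≥ t (string lengths are nonnegative)
theorem pvB_prefix_ge (cs : List String) (t : Int) :
    ∀ p ∈ pvB_prefix cs t, t ≤ p := by
  induction cs generalizing t with
  | nil => simp [pvB_prefix]
  | cons c rest ih =>
    intro p hp
    have hlen : 0 ≤ PySem.Str.len c := by simp [PySem.Str.len_eq]
    simp only [pvB_prefix, List.mem_cons] at hp
    rcases hp with rfl | hp
    · omega
    · have := ih (t + PySem.Str.len c) p hp; omega

theorem pvA_go_eq (cs : List String) (t m : Int) (out : List String) :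
    pvA_go cs t m out = out ++ cs.take ((pvB_prefix cs t).countP (fun p => p ≤ m)) := by
  induction cs generalizing t out with
  | nil => simp [pvA_go, pvB_prefix]
  | cons c rest ih =>
    by_cases h : t + PySem.Str.len c > m
    · have hzero : (pvB_prefix (c :: rest) t).countP (fun p => p ≤ m) = 0 := by
        rw [List.countP_eq_zero]
        intro p hp
        simp only [pvB_prefix, List.mem_cons] at hp
        have hge : t + PySem.Str.len c ≤ p := by
          rcases hp with rfl | hp
          · omega
          · exact pvB_prefix_ge rest (t + PySem.Str.len c) p hp
        simp only [decide_eq_true_eq]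
        omega
      unfold pvA_go
      rw [if_pos h, hzero]
      simp
    · have hle : t + PySem.Str.len c ≤ m := by omega
      simp only [pvA_go, if_neg h, pvB_prefix, List.countP_cons, ih, decide_eq_true_eq, hle,
        if_pos, List.take_succ_cons, List.append_assoc, List.singleton_append]

-- ===== VERDICT (by name: the statement is the Claim_ definition above) =====
theorem truncate_comments_py_spec : Claim_equal_truncate_comments_py := by
  intro comments max_chars _
  unfold Spec_truncate_comments_py truncate_comments_py truncate_comments_py_alt
  simpa using pvA_go_eq comments 0 max_chars []
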